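-- pv_equiv track=rewrite | github.com/titusgd/PDF-Reader | src/pdf_handler.py | get_text_from_words
-- ===== SOURCE A (Python) =====
-- def get_text_from_words(page_num: int, selected_words):
--     """
--     從選取的單詞列表提取文字
--
--     Args:
--         page_num: 頁碼
--         selected_words: 選取的單詞列表 (from get_text("words"))
--
--     Returns:
--         組合的文字
--     """
--     if not selected_words:
--         return ""
--
--     # 按行和位置排序
--     sorted_words = sorted(selected_words, key=lambda w: (w[5], w[6], w[7]))  # block_no, line_no, word_no
--
--     # 組合文字
--     result_parts = []
--     prev_line = None
--
--     for word_info in sorted_words: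
--         word = word_info[4]  # 文字內容
--         line_no = word_info[6]  # 行號
--
--         # 如果換行，添加空格分隔
--         if prev_line is not None and line_no != prev_line:
--             result_parts.append('\n')
--         elif prev_line is not None:
--             result_parts.append(' ')
--
--         result_parts.append(word)
--         prev_line = line_no
--
--     return "".join(result_parts)
-- ===== SOURCE B (Python) =====
-- def get_text_from_words(page_num: int, selected_words):
--     if not selected_words:
--         return ""
--
--     sorted_words = sorted(selected_words, key=lambda w: (w[5], w[6], w[7]))
--
--     # group consecutive words that share a line number, then join twice
--     lines = []
--     for w in sorted_words:
--         if lines and lines[-1][0] == w[6]: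
--             lines[-1][1].append(w[4])
--         else:
--             lines.append((w[6], [w[4]]))
--
--     return "\n".join(" ".join(words) for _, words in lines)
-- ===== Notes on version B (the rewrite author's own statement) =====
-- stated objective: alternative
-- what changed: Replaces the stateful prev_line flag that interleaves separator strings into one flat parts list with an explicit group-consecutive-words-by-line pass followed by a space-join per line and a newline-join of the lines.
import Mathlib
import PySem

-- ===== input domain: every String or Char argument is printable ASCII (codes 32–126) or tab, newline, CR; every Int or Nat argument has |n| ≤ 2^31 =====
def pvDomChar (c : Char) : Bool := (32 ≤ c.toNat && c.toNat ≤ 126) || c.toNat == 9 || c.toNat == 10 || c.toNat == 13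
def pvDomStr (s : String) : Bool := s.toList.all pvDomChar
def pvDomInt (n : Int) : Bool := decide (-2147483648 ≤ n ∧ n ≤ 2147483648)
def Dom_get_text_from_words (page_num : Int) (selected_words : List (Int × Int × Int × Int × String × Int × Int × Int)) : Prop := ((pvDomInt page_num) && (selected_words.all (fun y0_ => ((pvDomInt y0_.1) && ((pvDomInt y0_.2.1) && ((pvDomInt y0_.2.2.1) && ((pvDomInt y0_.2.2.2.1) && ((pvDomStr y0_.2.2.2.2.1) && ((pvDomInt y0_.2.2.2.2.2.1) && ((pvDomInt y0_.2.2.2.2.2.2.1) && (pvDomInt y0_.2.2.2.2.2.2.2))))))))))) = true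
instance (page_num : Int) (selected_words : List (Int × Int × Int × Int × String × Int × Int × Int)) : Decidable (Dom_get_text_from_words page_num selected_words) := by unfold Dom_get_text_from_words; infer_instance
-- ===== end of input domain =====

-- B groups the sorted words by consecutive equal line number and joins twice, instead of A's
-- stateful prev_line flag emitting separators into one flat list; same cost, different decomposition.

-- the sort key (w[5], w[6], w[7]) packed into one Int: exact lexicographic encoding for the
-- components bounded by 2^31 (guaranteed by Dom); both Pythons sort with this same key
def pvKey_get_text_from_words (w : Int × Int × Int × Int × String × Int × Int × Int) : Int :=
  (w.2.2.2.2.2.1 * 17179869184 + w.2.2.2.2.2.2.1) * 17179869184 + w.2.2.2.2.2.2.2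

-- ===== PORT A =====
-- loop body of A's for-loop (named helper; one iteration, exactly A's branch order)
def pvStepA (st : List String × Option Int) (word_info : Int × Int × Int × Int × String × Int × Int × Int) : List String × Option Int :=
  let word := word_info.2.2.2.2.1
  let line_no := word_info.2.2.2.2.2.2.1
  let parts :=
    match st.2 with
    | some prev => if line_no ≠ prev then st.1 ++ ["\n"] else st.1 ++ [" "]
    | none => st.1
  (parts ++ [word], some line_no)

def get_text_from_words (page_num : Int) (selected_words : List (Int × Int × Int × Int × String × Int × Int × Int)) : String :=
  if selected_words = [] then ""
  else
    let sorted_words := PySem.List.sorted selected_words pvKey_get_text_from_words false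
    let st := sorted_words.foldl pvStepA ([], none)
    PySem.Str.join "" st.1

-- ===== PORT B =====
-- loop body of B's grouping for-loop (named helper; one iteration, exactly B's branch order)
def pvStepB (lines : List (Int × List String)) (w : Int × Int × Int × Int × String × Int × Int × Int) : List (Int × List String) :=
  match lines.getLast? with
  | some last =>
      if last.1 == w.2.2.2.2.2.2.1 then
        lines.dropLast ++ [(last.1, last.2 ++ [w.2.2.2.2.1])]
      else
        lines ++ [(w.2.2.2.2.2.2.1, [w.2.2.2.2.1])]
  | none => [(w.2.2.2.2.2.2.1, [w.2.2.2.2.1])]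

def get_text_from_words_alt (page_num : Int) (selected_words : List (Int × Int × Int × Int × String × Int × Int × Int)) : String :=
  if selected_words = [] then ""
  else
    let sorted_words := PySem.List.sorted selected_words pvKey_get_text_from_words false
    let lines := sorted_words.foldl pvStepB []
    PySem.Str.join "\n" (lines.map (fun p => PySem.Str.join " " p.2))

-- ===== PRECONDITION & SPEC =====
def Spec_get_text_from_words (page_num : Int) (selected_words : List (Int × Int × Int × Int × String × Int × Int × Int)) (out : String) : Prop := out = get_text_from_words_alt page_num selected_words
instance (page_num : Int) (selected_words : List (Int × Int × Int × Int × String × Int × Int × Int)) (out : String) : Decidable (Spec_get_text_from_words page_num selected_words out) := by unfold Spec_get_text_from_words; infer_instance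

-- ===== CLAIM (what is proved, stated in full; the proofs are below) =====
def Claim_equal_get_text_from_words : Prop := ∀ (page_num : Int) (selected_words : List (Int × Int × Int × Int × String × Int × Int × Int)), Dom_get_text_from_words page_num selected_words → Spec_get_text_from_words page_num selected_words (get_text_from_words page_num selected_words)

-- ===== LEMMAS AND PROOFS =====

-- proof-only abbreviations
def pvWord (w : Int × Int × Int × Int × String × Int × Int × Int) : String := w.2.2.2.2.1
def pvLine (w : Int × Int × Int × Int × String × Int × Int × Int) : Int := w.2.2.2.2.2.2.1

-- recursive form of A's loop output (the parts list emitted from state prev)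
def pvAux (prev : Option Int) : List (Int × Int × Int × Int × String × Int × Int × Int) → List String
  | [] => []
  | w :: ws =>
      (match prev with
       | some p => [if pvLine w ≠ p then "\n" else " "]
       | none => []) ++ (pvWord w :: pvAux (some (pvLine w)) ws)

-- recursive form of B's grouping continuation from an open last group (l, ps)
def pvExt (l : Int) (ps : List String) : List (Int × Int × Int × Int × String × Int × Int × Int) → List (Int × List String)
  | [] => [(l, ps)]
  | w :: ws =>
      if pvLine w = l then pvExt l (ps ++ [pvWord w]) ws
      else (l, ps) :: pvExt (pvLine w) [pvWord w] ws

theorem pvAux_foldl (ws : List (Int × Int × Int × Int × String × Int × Int × Int))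
    (parts : List String) (prev : Option Int) :
    (ws.foldl pvStepA (parts, prev)).1 = parts ++ pvAux prev ws := by
  induction ws generalizing parts prev with
  | nil => simp [pvAux]
  | cons w ws ih =>
      rw [List.foldl_cons]
      cases prev with
      | none =>
          rw [show pvStepA (parts, none) w
                = (parts ++ [w.2.2.2.2.1], some w.2.2.2.2.2.2.1) from rfl, ih]
          simp [pvAux, pvWord, pvLine]
      | some p =>
          by_cases h : w.2.2.2.2.2.2.1 = p
          · rw [show pvStepA (parts, some p) w
                  = (parts ++ [" "] ++ [w.2.2.2.2.1], some w.2.2.2.2.2.2.1) by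
                simp [pvStepA, h], ih]
            simp [pvAux, pvWord, pvLine, h, List.append_assoc]
          · rw [show pvStepA (parts, some p) w
                  = (parts ++ ["\n"] ++ [w.2.2.2.2.1], some w.2.2.2.2.2.2.1) by
                simp [pvStepA, h], ih]
            simp [pvAux, pvWord, pvLine, h, List.append_assoc]

theorem pvExt_foldl (ws : List (Int × Int × Int × Int × String × Int × Int × Int))
    (acc : List (Int × List String)) (l : Int) (ps : List String) :
    (ws.foldl pvStepB (acc ++ [(l, ps)])) = acc ++ pvExt l ps ws := by
  induction ws generalizing acc l ps with
  | nil => simp [pvExt]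
  | cons w ws ih =>
      have hlast : (acc ++ [(l, ps)]).getLast? = some (l, ps) := by simp
      rw [List.foldl_cons]
      by_cases h : w.2.2.2.2.2.2.1 = l
      · rw [show pvStepB (acc ++ [(l, ps)]) w = acc ++ [(l, ps ++ [w.2.2.2.2.1])] by
            simp [pvStepB, hlast, h, List.dropLast_concat], ih]
        simp [pvExt, pvLine, pvWord, h]
      · rw [show pvStepB (acc ++ [(l, ps)]) w
              = (acc ++ [(l, ps)]) ++ [(w.2.2.2.2.2.2.1, [w.2.2.2.2.1])] by
            simp [pvStepB, hlast, Ne.symm h], ih (acc ++ [(l, ps)])]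
        simp [pvExt, pvLine, pvWord, h, List.append_assoc]

theorem pvJoin_nil_cons (p : List Char) (rest : List (List Char)) :
    PySem.Chars.join [] (p :: rest) = p ++ PySem.Chars.join [] rest := by
  cases rest with
  | nil => simp [PySem.Chars.join_singleton, PySem.Chars.join_nil]
  | cons q r => rw [PySem.Chars.join_cons_cons]; simp

theorem pvJoin_append_singleton (sep : List Char) (ps : List (List Char)) (x : List Char)
    (h : ps ≠ []) :
    PySem.Chars.join sep (ps ++ [x]) = PySem.Chars.join sep ps ++ sep ++ x := by
  induction ps with
  | nil => simp at h
  | cons p ps ih =>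
      cases ps with
      | nil => simp [PySem.Chars.join_cons_cons, PySem.Chars.join_singleton]
      | cons q r =>
          simp only [List.cons_append]
          rw [PySem.Chars.join_cons_cons]
          have hh := ih (by simp)
          simp only [List.cons_append] at hh
          rw [hh, PySem.Chars.join_cons_cons]
          simp [List.append_assoc]

theorem pvJoin_cons_ne (sep p : List Char) (rest : List (List Char)) (h : rest ≠ []) :
    PySem.Chars.join sep (p :: rest) = p ++ sep ++ PySem.Chars.join sep rest := by
  cases rest with
  | nil => simp at h
  | cons q r => simp [PySem.Chars.join_cons_cons]

theorem pvExt_ne_nil (l : Int) (ps : List String)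
    (ws : List (Int × Int × Int × Int × String × Int × Int × Int)) :
    pvExt l ps ws ≠ [] := by
  induction ws generalizing l ps with
  | nil => simp [pvExt]
  | cons w ws ih =>
      by_cases h : pvLine w = l <;> simp [pvExt, h, ih]

-- the core correspondence: B's grouped double join equals A's flat join, continued from
-- an open group (l, ps) on the B side and prev = some l on the A side
theorem pvCore (ws : List (Int × Int × Int × Int × String × Int × Int × Int))
    (l : Int) (ps : List String) (hps : ps ≠ []) :
    PySem.Chars.join ['\n']
      ((pvExt l ps ws).map (fun p => (PySem.Str.join " " p.2).toList))
    = PySem.Chars.join [' '] (ps.map String.toList)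
      ++ PySem.Chars.join [] ((pvAux (some l) ws).map String.toList) := by
  induction ws generalizing l ps with
  | nil =>
      simp [pvExt, pvAux, PySem.Chars.join_singleton, PySem.Chars.join_nil,
        PySem.Str.toList_join]
  | cons w ws ih =>
      by_cases h : pvLine w = l
      · rw [show pvExt l ps (w :: ws) = pvExt l (ps ++ [pvWord w]) ws by simp [pvExt, h]]
        rw [show pvAux (some l) (w :: ws)
              = " " :: pvWord w :: pvAux (some (pvLine w)) ws by simp [pvAux, h]]
        rw [ih l (ps ++ [pvWord w]) (by simp)]
        simp only [List.map_append, List.map_cons, List.map_nil]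
        rw [pvJoin_append_singleton [' '] (ps.map String.toList) _ (by simpa using hps), h]
        simp [pvJoin_nil_cons, List.append_assoc]
      · rw [show pvExt l ps (w :: ws) = (l, ps) :: pvExt (pvLine w) [pvWord w] ws by
            simp [pvExt, h]]
        rw [show pvAux (some l) (w :: ws)
              = "\n" :: pvWord w :: pvAux (some (pvLine w)) ws by simp [pvAux, h]]
        rw [List.map_cons,
          pvJoin_cons_ne _ _ _ (by simpa using pvExt_ne_nil (pvLine w) [pvWord w] ws)]
        rw [ih (pvLine w) [pvWord w] (by simp)]
        simp [PySem.Str.toList_join, PySem.Chars.join_singleton, pvJoin_nil_cons,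
          List.append_assoc]

-- ===== VERDICT (by name: the statement is the Claim_ definition above) =====
theorem get_text_from_words_spec : Claim_equal_get_text_from_words := by
  intro page_num selected_words _hdom
  unfold Spec_get_text_from_words get_text_from_words get_text_from_words_alt
  by_cases hnil : selected_words = []
  · simp [hnil]
  · simp only [if_neg hnil]
    cases hs : PySem.List.sorted selected_words pvKey_get_text_from_words false with
    | nil =>
        exact absurd ((PySem.List.sorted_eq_nil_iff _ _ _).1 hs) hnil
    | cons w rest =>
        have hB := pvExt_foldl rest [] (pvLine w) [pvWord w]
        simp only [List.nil_append] at hB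
        rw [List.foldl_cons, List.foldl_cons,
          show pvStepB [] w = [] ++ [(pvLine w, [pvWord w])] by
            simp [pvStepB, pvLine, pvWord],
          List.nil_append, hB,
          show pvStepA ([], none) w = ([pvWord w], some (pvLine w)) from rfl,
          pvAux_foldl rest [pvWord w] (some (pvLine w)),
          List.singleton_append]
        have hcore := pvCore rest (pvLine w) [pvWord w] (by simp)
        simp only [List.map_cons, List.map_nil, PySem.Chars.join_singleton] at hcore
        simp only [PySem.Str.join, List.map_cons, List.map_map]
        apply congrArg String.ofList
        rw [show String.toList "" = [] from rfl, show String.toList "\n" = ['\n'] from rfl]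
        rw [pvJoin_nil_cons, ← hcore]
        simp [PySem.Str.join, Function.comp_def, String.toList_ofList]
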